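-- pv_equiv track=rewrite | github.com/WorlesEnric/sva_toolkit | src/sva_toolkit/implication_checker/checker.py | _extract_counterexample
-- ===== SOURCE A (Python) =====
-- from typing import Optional, Set, List, Tuple, Dict, Any
--
-- def _extract_counterexample(log: str) -> Optional[str]:
--     """
--     Extract counterexample from EBMC log.
--
--     Args:
--         log: EBMC log output
--
--     Returns:
--         Counterexample trace or None
--     """
--     lines = log.split('\n')
--     cex_lines = []
--     in_cex = False
--
--     for line in lines:
--         if 'counterexample' in line.lower() or 'refuted' in line.lower():
--             in_cex = True
--         if 'state' in line.lower() or 'cycle' in line.lower():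
--             in_cex = True
--         if in_cex:
--             cex_lines.append(line)
--             if len(cex_lines) > 50:
--                 break
--
--     return '\n'.join(cex_lines) if cex_lines else None
-- ===== SOURCE B (Python) =====
-- def _extract_counterexample(log):
--     """Locate the first trigger line, then slice: same result, no stateful flag loop."""
--     lines = log.split('\n')
--     keywords = ('counterexample', 'refuted', 'state', 'cycle')
--     for i, line in enumerate(lines):
--         low = line.lower()
--         if any(k in low for k in keywords):
--             return '\n'.join(lines[i:i + 51])
--     return None
-- ===== Notes on version B (the rewrite author's own statement) =====
-- stated objective: simpler
-- what changed: Replaces the stateful flag-and-append loop (with an in-loop length cap and break) by locate-first-trigger-line then slice lines[i:i+51] and join.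
import Mathlib
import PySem

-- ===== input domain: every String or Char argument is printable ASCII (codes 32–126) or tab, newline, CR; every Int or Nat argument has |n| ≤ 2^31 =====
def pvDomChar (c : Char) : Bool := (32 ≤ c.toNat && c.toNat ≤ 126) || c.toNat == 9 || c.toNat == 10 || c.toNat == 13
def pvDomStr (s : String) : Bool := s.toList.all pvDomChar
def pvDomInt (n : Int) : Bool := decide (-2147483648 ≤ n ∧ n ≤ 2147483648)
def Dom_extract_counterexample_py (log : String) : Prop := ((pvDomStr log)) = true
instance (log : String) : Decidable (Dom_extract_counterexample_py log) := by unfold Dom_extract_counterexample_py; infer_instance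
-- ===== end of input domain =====

-- B replaces A's stateful flag-and-append loop by locate-first-trigger-line-then-slice; objective: simpler.

-- ===== PORT A =====
-- A's flag-and-append loop, step for step (break when len(cex_lines) > 50)
def pvLoopA : List String → List String → Bool → List String
  | [], acc, _ => acc
  | l :: rest, acc, inCex =>
    let inCex1 := if PySem.Str.isIn "counterexample" (PySem.Str.lower l)
                    || PySem.Str.isIn "refuted" (PySem.Str.lower l) then true else inCex
    let inCex2 := if PySem.Str.isIn "state" (PySem.Str.lower l)
                    || PySem.Str.isIn "cycle" (PySem.Str.lower l) then true else inCex1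
    if inCex2 then
      let acc2 := acc ++ [l]
      if acc2.length > 50 then acc2 else pvLoopA rest acc2 inCex2
    else pvLoopA rest acc inCex2

def extract_counterexample_py (log : String) : Option String :=
  let lines := (PySem.Str.split? log "\n").getD []   -- '\n' ≠ "", so split? never returns none
  let cexLines := pvLoopA lines [] false
  if cexLines ≠ [] then some (PySem.Str.join "\n" cexLines) else none

-- ===== PORT B =====
def pvTrigger (line : String) : Bool :=
  let low := PySem.Str.lower line
  ["counterexample", "refuted", "state", "cycle"].any (fun k => PySem.Str.isIn k low)

def extract_counterexample_py_alt (log : String) : Option String :=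
  let lines := (PySem.Str.split? log "\n").getD []   -- '\n' ≠ "", so split? never returns none
  match lines.findIdx? pvTrigger with
  | some i => some (PySem.Str.join "\n" ((lines.drop i).take 51))
  | none => none

-- ===== PRECONDITION & SPEC =====
def Spec_extract_counterexample_py (log : String) (out : Option String) : Prop := out = extract_counterexample_py_alt log
instance (log : String) (out : Option String) : Decidable (Spec_extract_counterexample_py log out) := by unfold Spec_extract_counterexample_py; infer_instance

-- ===== CLAIM (what is proved, stated in full; the proofs are below) =====
def Claim_equal_extract_counterexample_py : Prop := ∀ (log : String), Dom_extract_counterexample_py log → Spec_extract_counterexample_py log (extract_counterexample_py log)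

-- ===== LEMMAS AND PROOFS =====

-- B's trigger test is the disjunction of A's two flag conditions
lemma pvTrigger_eq (l : String) :
    pvTrigger l = ((PySem.Str.isIn "counterexample" (PySem.Str.lower l)
                      || PySem.Str.isIn "refuted" (PySem.Str.lower l))
                   || (PySem.Str.isIn "state" (PySem.Str.lower l)
                      || PySem.Str.isIn "cycle" (PySem.Str.lower l))) := by
  simp only [pvTrigger, List.any_cons, List.any_nil, Bool.or_false, Bool.or_assoc]

-- A's loop body with the flag clear, phrased through B's trigger test
lemma pvLoopA_cons_false (l : String) (rest acc : List String) :
    pvLoopA (l :: rest) acc false =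
      (if pvTrigger l then
        (if (acc ++ [l]).length > 50 then acc ++ [l] else pvLoopA rest (acc ++ [l]) true)
       else pvLoopA rest acc false) := by
  rw [pvTrigger_eq]
  simp only [pvLoopA]
  cases PySem.Str.isIn "counterexample" (PySem.Str.lower l) <;>
    cases PySem.Str.isIn "refuted" (PySem.Str.lower l) <;>
    cases PySem.Str.isIn "state" (PySem.Str.lower l) <;>
    cases PySem.Str.isIn "cycle" (PySem.Str.lower l) <;> simp

-- once the flag is set, A's loop just appends up to 51 lines in total
lemma pvLoopA_true (ls : List String) : ∀ acc : List String, acc.length ≤ 50 →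
    pvLoopA ls acc true = acc ++ ls.take (51 - acc.length) := by
  induction ls with
  | nil => intro acc _; simp [pvLoopA]
  | cons l rest ih =>
    intro acc hle
    simp only [pvLoopA, ite_self, if_true]
    by_cases h50 : acc.length = 50
    · have hc : (acc ++ [l]).length > 50 := by simp [h50]
      rw [if_pos hc]
      simp [h50, List.take_succ_cons]
    · have hc : ¬ (acc ++ [l]).length > 50 := by simp; omega
      rw [if_neg hc, ih (acc ++ [l]) (by simp; omega)]
      have h51 : 51 - acc.length = (51 - (acc.length + 1)) + 1 := by omega
      simp [h51, List.take_succ_cons]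

-- A's loop starting with the flag clear = find the first trigger line, then take 51
lemma pvLoopA_false (ls : List String) :
    pvLoopA ls [] false =
      (match ls.findIdx? pvTrigger with
       | some i => (ls.drop i).take 51
       | none => []) := by
  induction ls with
  | nil => simp [pvLoopA]
  | cons l rest ih =>
    rw [List.findIdx?_cons, pvLoopA_cons_false]
    by_cases ht : pvTrigger l = true
    · rw [if_pos ht, ht]
      have : ¬ ([] ++ [l] : List String).length > 50 := by simp
      rw [if_neg this]
      simp [pvLoopA_true rest [l] (by simp), List.take_succ_cons]
    · rw [if_neg ht, ih]
      simp only [Bool.not_eq_true] at ht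
      rw [ht]
      cases hf : rest.findIdx? pvTrigger <;> simp

-- ===== VERDICT (by name: the statement is the Claim_ definition above) =====
theorem extract_counterexample_py_spec : Claim_equal_extract_counterexample_py := by
  intro log _
  unfold Spec_extract_counterexample_py
  simp only [extract_counterexample_py, extract_counterexample_py_alt]
  rw [pvLoopA_false]
  cases hf : ((PySem.Str.split? log "\n").getD []).findIdx? pvTrigger with
  | none => simp
  | some i =>
    have hi : i < ((PySem.Str.split? log "\n").getD []).length :=
      (List.findIdx?_eq_some_iff_findIdx_eq.1 hf).1
    have hne : (((PySem.Str.split? log "\n").getD []).drop i).take 51 ≠ [] := by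
      simp [List.take_eq_nil_iff, List.drop_eq_nil_iff]
      omega
    simp [hne]
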